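-- pv_equiv track=rewrite | github.com/larriera/uba-intprogramacion | modelos-2p/salaescape.py | tiempo_mas_rapido
-- ===== SOURCE A (Python) =====
-- def tiempo_mas_rapido(tiempos_salas: list[int]) -> int:
--     min: int = 61
--     i_min: int = -1
--     i: int = 0
--     while (i < len(tiempos_salas)):
--         if (0 < tiempos_salas[i] < 61) and (tiempos_salas[i] < min):
--             min = tiempos_salas[i]
--             i_min = i
--         i += 1
--     return i_min
-- ===== SOURCE B (Python) =====
-- def tiempo_mas_rapido(tiempos_salas: list[int]) -> int:
--     # Sort the (index, time) pairs by time (stable: ties keep index order),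
--     # then return the index of the first valid entry in sorted order.
--     for i, t in sorted(enumerate(tiempos_salas), key=lambda p: p[1]):
--         if 0 < t < 61:
--             return i
--     return -1
-- ===== Notes on version B (the rewrite author's own statement) =====
-- stated objective: alternative
-- what changed: Replaces A's single fused min-tracking while loop with sort-then-scan: stably sort the (index, time) pairs by time, then return the index of the first pair in sorted order whose time is valid (-1 if the scan finds none); stability makes the first valid sorted pair the first index of the smallest valid time, matching A.
import Mathlib
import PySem

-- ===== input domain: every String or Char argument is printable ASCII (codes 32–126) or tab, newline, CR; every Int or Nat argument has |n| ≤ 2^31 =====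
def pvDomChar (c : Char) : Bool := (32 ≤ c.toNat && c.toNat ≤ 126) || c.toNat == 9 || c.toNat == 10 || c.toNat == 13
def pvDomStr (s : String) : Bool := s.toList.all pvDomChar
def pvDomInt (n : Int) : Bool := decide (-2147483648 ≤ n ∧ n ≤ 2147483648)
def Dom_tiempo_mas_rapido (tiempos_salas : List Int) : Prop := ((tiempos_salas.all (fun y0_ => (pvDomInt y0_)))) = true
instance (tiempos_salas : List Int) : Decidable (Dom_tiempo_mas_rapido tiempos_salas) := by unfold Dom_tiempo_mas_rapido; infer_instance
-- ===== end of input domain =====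

-- B replaces A's fused min-tracking while loop by sort-then-scan: stably sort the (index, time)
-- pairs by time, then return the index of the first valid pair in sorted order (-1 if none);
-- an alternative algorithm of different shape (stability gives the same first-min-index answer).


-- ===== PORT A =====
-- while loop over indices, state (min, i_min, i); one fold step per element, in order
def tiempo_mas_rapido (tiempos_salas : List Int) : Int :=
  (tiempos_salas.foldl
    (fun (st : Int × Int × Int) t =>
      if 0 < t ∧ t < 61 ∧ t < st.1 then (t, st.2.2, st.2.2 + 1)
      else (st.1, st.2.1, st.2.2 + 1))
    (61, -1, 0)).2.1

-- ===== PORT B =====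
-- the guard '0 < t < 61' of B's loop body
def pvValid (p : Int × Int) : Bool := decide (0 < p.2) && decide (p.2 < 61)

-- B's for loop with early return: scan the sorted pairs, return the first valid index, else -1
def pvScan : List (Int × Int) → Int
  | [] => -1
  | p :: rest => if pvValid p then p.1 else pvScan rest

-- sorted(enumerate(ts), key=lambda p: p[1]) → PySem.List.sorted (enumerate ts 0) (·.2), then scan
def tiempo_mas_rapido_alt (tiempos_salas : List Int) : Int :=
  pvScan (PySem.List.sorted (PySem.List.enumerate tiempos_salas 0) (fun p => p.2))

-- ===== PRECONDITION & SPEC =====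
def Spec_tiempo_mas_rapido (tiempos_salas : List Int) (out : Int) : Prop := out = tiempo_mas_rapido_alt tiempos_salas
instance (tiempos_salas : List Int) (out : Int) : Decidable (Spec_tiempo_mas_rapido tiempos_salas out) := by unfold Spec_tiempo_mas_rapido; infer_instance

-- ===== CLAIM (what is proved, stated in full; the proofs are below) =====
def Claim_equal_tiempo_mas_rapido : Prop := ∀ (tiempos_salas : List Int), Dom_tiempo_mas_rapido tiempos_salas → Spec_tiempo_mas_rapido tiempos_salas (tiempo_mas_rapido tiempos_salas)

-- ===== LEMMAS AND PROOFS =====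

-- pvScan is find?-then-project
theorem pvScan_eq_find? (l : List (Int × Int)) :
    pvScan l = match l.find? pvValid with | none => -1 | some q => q.1 := by
  induction l with
  | nil => rfl
  | cons p rest ih =>
    by_cases h : pvValid p = true
    · simp [pvScan, h]
    · simp only [pvScan, List.find?_cons, h, Bool.false_eq_true, ite_false]
      exact ih

-- inserting an invalid element does not change the first valid element
theorem pv_find_insert_invalid (x : Int × Int) (hx : pvValid x = false) (s : List (Int × Int)) :
    (PySem.List.insertBy (fun a b => decide (a.2 < b.2)) x s).find? pvValid = s.find? pvValid := by
  induction s with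
  | nil => simp [PySem.List.insertBy, hx]
  | cons y ys ih =>
    simp only [PySem.List.insertBy]
    split
    · simp [hx]
    · simp only [List.find?_cons]
      cases hy : pvValid y
      · exact ih
      · rfl

-- inserting a valid element where no valid element exists yet: it becomes the first valid one
theorem pv_find_insert_valid_none (x : Int × Int) (hx : pvValid x = true) (s : List (Int × Int))
    (hnone : s.find? pvValid = none) :
    (PySem.List.insertBy (fun a b => decide (a.2 < b.2)) x s).find? pvValid = some x := by
  induction s with
  | nil => simp [PySem.List.insertBy, hx]
  | cons y ys ih =>
    rw [List.find?_cons] at hnone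
    cases hy : pvValid y
    · rw [hy] at hnone
      simp only [PySem.List.insertBy]
      split
      · simp [hx]
      · rw [List.find?_cons, hy]
        exact ih hnone
    · rw [hy] at hnone; cases hnone

-- inserting a valid element into a key-sorted list whose first valid element is q:
-- the new first valid element is x iff x's key is strictly smaller (the old q wins ties: stability)
theorem pv_find_insert_valid_some (x : Int × Int) (hx : pvValid x = true) (s : List (Int × Int))
    (hs : s.Pairwise (fun a b => a.2 ≤ b.2)) (q : Int × Int) (hq : s.find? pvValid = some q) :
    (PySem.List.insertBy (fun a b => decide (a.2 < b.2)) x s).find? pvValid =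
      if x.2 < q.2 then some x else some q := by
  induction s with
  | nil => cases hq
  | cons y ys ih =>
    rw [List.pairwise_cons] at hs
    rw [List.find?_cons] at hq
    simp only [PySem.List.insertBy]
    split
    · rename_i hlt
      rw [decide_eq_true_eq] at hlt
      have hyq : y.2 ≤ q.2 := by
        cases hy : pvValid y
        · rw [hy] at hq
          exact hs.1 q (List.mem_of_find?_eq_some hq)
        · rw [hy] at hq
          cases hq; exact le_refl _
      have hxq : x.2 < q.2 := lt_of_lt_of_le hlt hyq
      rw [if_pos hxq, List.find?_cons, hx]
    · rename_i hge
      rw [decide_eq_true_eq] at hge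
      rw [not_lt] at hge
      cases hy : pvValid y
      · rw [hy] at hq
        rw [List.find?_cons, hy]
        exact ih hs.2 hq
      · rw [hy] at hq
        cases hq
        rw [if_neg (not_lt.mpr hge), List.find?_cons, hy]

-- insertBy preserves key-sortedness
theorem pv_insert_pairwise (x : Int × Int) (s : List (Int × Int))
    (hs : s.Pairwise (fun a b => a.2 ≤ b.2)) :
    (PySem.List.insertBy (fun a b => decide (a.2 < b.2)) x s).Pairwise (fun a b => a.2 ≤ b.2) := by
  induction s with
  | nil => simp [PySem.List.insertBy]
  | cons y ys ih =>
    rw [List.pairwise_cons] at hs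
    simp only [PySem.List.insertBy]
    split
    · rename_i hlt
      rw [decide_eq_true_eq] at hlt
      refine List.pairwise_cons.mpr ⟨?_, List.pairwise_cons.mpr hs⟩
      intro b hb
      rcases List.mem_cons.mp hb with h | h
      · exact le_of_lt (h ▸ hlt)
      · exact le_of_lt (lt_of_lt_of_le hlt (hs.1 b h))
    · rename_i hge
      rw [decide_eq_true_eq] at hge
      rw [not_lt] at hge
      refine List.pairwise_cons.mpr ⟨?_, ih hs.2⟩
      intro b hb
      rcases (PySem.List.mem_insertBy _ _ _ _).mp hb with h | h
      · exact h ▸ hge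
      · exact hs.1 b h

-- Main invariant: A's running state (min, i_min) matches the first valid element of B's
-- insertion-sort accumulator, processing the same elements left to right
theorem pv_main (xs : List Int) : ∀ (i m im : Int) (s : List (Int × Int)),
    s.Pairwise (fun a b => a.2 ≤ b.2) →
    (match s.find? pvValid with
     | none => m = 61 ∧ im = -1
     | some q => q.1 = im ∧ q.2 = m) →
    (xs.foldl
      (fun (st : Int × Int × Int) t =>
        if 0 < t ∧ t < 61 ∧ t < st.1 then (t, st.2.2, st.2.2 + 1)
        else (st.1, st.2.1, st.2.2 + 1))
      (m, im, i)).2.1 =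
    (match ((PySem.List.enumerate xs i).foldl
        (fun acc x => PySem.List.insertBy (fun a b => decide (a.2 < b.2)) x acc) s).find? pvValid with
     | none => -1 | some q => q.1) := by
  induction xs with
  | nil =>
    intro i m im s _ hinv
    simp only [List.foldl_nil, PySem.List.enumerate]
    cases hf : s.find? pvValid with
    | none => rw [hf] at hinv; simp [hinv.2]
    | some q => rw [hf] at hinv; simp [hinv.1]
  | cons t r ih =>
    intro i m im s hs hinv
    rw [PySem.List.enumerate_cons, List.foldl_cons, List.foldl_cons]
    by_cases hv : pvValid (i, t) = true
    · have hv' : 0 < t ∧ t < 61 := by simpa [pvValid] using hv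
      cases hf : s.find? pvValid with
      | none =>
        rw [hf] at hinv
        have hc : 0 < t ∧ t < 61 ∧ t < m := ⟨hv'.1, hv'.2, by omega⟩
        rw [if_pos hc]
        exact ih (i + 1) t i _ (pv_insert_pairwise _ _ hs)
          (by rw [pv_find_insert_valid_none (i, t) hv s hf]; exact ⟨rfl, rfl⟩)
      | some q =>
        rw [hf] at hinv
        have hfind := pv_find_insert_valid_some (i, t) hv s hs q hf
        by_cases hlt : t < m
        · have hc : 0 < t ∧ t < 61 ∧ t < m := ⟨hv'.1, hv'.2, hlt⟩
          rw [if_pos hc]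
          rw [if_pos (show (i, t).2 < q.2 by simp [hinv.2, hlt])] at hfind
          exact ih (i + 1) t i _ (pv_insert_pairwise _ _ hs) (by rw [hfind]; exact ⟨rfl, rfl⟩)
        · have hc : ¬ (0 < t ∧ t < 61 ∧ t < m) := by tauto
          rw [if_neg hc]
          rw [if_neg (show ¬ (i, t).2 < q.2 by simp only [hinv.2]; omega)] at hfind
          exact ih (i + 1) m im _ (pv_insert_pairwise _ _ hs) (by rw [hfind]; exact hinv)
    · have hc : ¬ (0 < t ∧ t < 61 ∧ t < m) := by
        simp only [pvValid, Bool.and_eq_true, decide_eq_true_eq] at hv; tauto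
      rw [if_neg hc]
      have hfind := pv_find_insert_invalid (i, t) (by simpa using hv) s
      exact ih (i + 1) m im _ (pv_insert_pairwise _ _ hs) (by rw [hfind]; exact hinv)

-- ===== VERDICT (by name: the statement is the Claim_ definition above) =====
theorem tiempo_mas_rapido_spec : Claim_equal_tiempo_mas_rapido := by
  intro xs _
  unfold Spec_tiempo_mas_rapido tiempo_mas_rapido tiempo_mas_rapido_alt
  rw [pvScan_eq_find?, PySem.List.sorted_eq_foldl_insertBy]
  exact pv_main xs 0 61 (-1) [] (by simp) (by simp)
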